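-- pv_equiv track=rewrite | github.com/MohammedNayaz/Machine-learning-Internship-2 | Project YouTube Adview Prediction/Project.py | checki
-- ===== SOURCE A (Python) =====
-- def checki(x):
--   y = x[2:]
--   h = ''
--   m = ''
--   s = ''
--   mm = ''
--   p = ['H' , 'M' , 'S']
--
--   for i in y:
--     if i not in p:
--       mm+=i
--     else:
--       if (i == "H"):
--         h = mm
--         mm = ''
--       elif (i == "M"):
--         m = mm
--         mm = ''
--       else:
--         s = mm
--         mm = ''
--
--   if (h == ''):
--     h = '00'
--   if (m == ''):
--     m = '00'
--   if (s == ''):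
--     s = '00'
--
--   bp = h+':'+m+':'+s
--   return bp
-- ===== SOURCE B (Python) =====
-- def checki(x):
--     # Tokenize the tail into (buffer, unit) pairs, then assign by unit letter.
--     pairs = []
--     buf = ''
--     for c in x[2:]:
--         if c in 'HMS':
--             pairs.append((buf, c))
--             buf = ''
--         else:
--             buf += c
--     h = m = s = ''
--     for buf, u in pairs:
--         if u == 'H':
--             h = buf
--         elif u == 'M':
--             m = buf
--         else:
--             s = buf
--     return (h or '00') + ':' + (m or '00') + ':' + (s or '00')
-- ===== Notes on version B (the rewrite author's own statement) =====
-- stated objective: idiomatic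
-- what changed: B first tokenizes the tail into (buffer, unit-letter) pairs in one scan and then assigns each buffer to h/m/s in a second loop over the pairs, replacing A's single character-by-character state machine that interleaves buffering and assignment.
import Mathlib
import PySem

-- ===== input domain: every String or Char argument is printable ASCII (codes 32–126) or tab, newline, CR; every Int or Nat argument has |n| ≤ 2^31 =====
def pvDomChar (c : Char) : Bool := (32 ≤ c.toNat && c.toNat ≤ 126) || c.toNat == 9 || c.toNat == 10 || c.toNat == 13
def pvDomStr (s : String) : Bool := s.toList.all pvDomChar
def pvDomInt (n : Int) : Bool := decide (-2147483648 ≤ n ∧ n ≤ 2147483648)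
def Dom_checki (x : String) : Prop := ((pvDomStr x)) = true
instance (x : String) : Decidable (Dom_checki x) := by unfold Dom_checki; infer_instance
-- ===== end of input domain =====

-- B replaces A's one-pass character state machine by a tokenize-then-assign decomposition (idiomatic; same cost).

-- ===== PORT A =====
-- A's single loop: state (h, m, s, mm) over the characters of y = x[2:]; strings as List Char (PySem.Chars style).
def checkiP : List Char := ['H', 'M', 'S']

def checkiLoopA : List Char → List Char × List Char × List Char × List Char → List Char × List Char × List Char × List Char
  | [], st => st
  | i :: y, (h, m, s, mm) =>
    if i ∉ checkiP then checkiLoopA y (h, m, s, mm ++ [i])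
    else if i = 'H' then checkiLoopA y (mm, m, s, [])
    else if i = 'M' then checkiLoopA y (h, mm, s, [])
    else checkiLoopA y (h, m, mm, [])

def checki (x : String) : String :=
  -- y = x[2:] : dropping 2 characters is exact for the nonnegative slice start
  let y := x.toList.drop 2
  let r := checkiLoopA y ([], [], [], [])
  let h := if r.1 = [] then ['0', '0'] else r.1
  let m := if r.2.1 = [] then ['0', '0'] else r.2.1
  let s := if r.2.2.1 = [] then ['0', '0'] else r.2.2.1
  String.ofList (h ++ ':' :: m ++ ':' :: s)

-- ===== PORT B =====
-- first pass of Source B: split the tail into (buffer, unit) pairs; trailing buffer is dropped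
def checkiUnits : List Char := ['H', 'M', 'S']

def checkiTok : List Char → List Char → List (List Char × Char)
  | [], _ => []
  | c :: t, buf => if c ∈ checkiUnits then (buf, c) :: checkiTok t [] else checkiTok t (buf ++ [c])

-- second pass of Source B: assign each captured buffer to its component (duplicates keep the last)
def checkiAssign : List (List Char × Char) → List Char × List Char × List Char → List Char × List Char × List Char
  | [], st => st
  | (buf, u) :: ps, (h, m, s) =>
    if u = 'H' then checkiAssign ps (buf, m, s)
    else if u = 'M' then checkiAssign ps (h, buf, s)
    else checkiAssign ps (h, m, buf)

def checki_alt (x : String) : String :=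
  let ps := checkiTok (x.toList.drop 2) []
  let r := checkiAssign ps ([], [], [])
  let h := if r.1 = [] then ['0', '0'] else r.1
  let m := if r.2.1 = [] then ['0', '0'] else r.2.1
  let s := if r.2.2 = [] then ['0', '0'] else r.2.2
  String.ofList (h ++ ':' :: m ++ ':' :: s)

-- ===== PRECONDITION & SPEC =====
def Spec_checki (x : String) (out : String) : Prop := out = checki_alt x
instance (x : String) (out : String) : Decidable (Spec_checki x out) := by unfold Spec_checki; infer_instance

-- ===== CLAIM (what is proved, stated in full; the proofs are below) =====
def Claim_equal_checki : Prop := ∀ (x : String), Dom_checki x → Spec_checki x (checki x)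

-- ===== LEMMAS AND PROOFS =====

-- A's loop and B's tokenize-then-assign compute the same (h, m, s); A's trailing mm is discarded.
theorem checkiLoop_eq_tok (y : List Char) :
    ∀ (h m s mm : List Char),
      (fun r => (r.1, r.2.1, r.2.2.1)) (checkiLoopA y (h, m, s, mm))
        = checkiAssign (checkiTok y mm) (h, m, s) := by
  induction y with
  | nil => intro h m s mm; simp [checkiLoopA, checkiTok, checkiAssign]
  | cons c t ih =>
    intro h m s mm
    by_cases hc : c ∈ checkiP
    · by_cases hH : c = 'H'
      · simp [checkiLoopA, checkiTok, checkiAssign, hH, checkiUnits, checkiP, ih]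
      · by_cases hM : c = 'M'
        · simp [checkiLoopA, checkiTok, checkiAssign, hM, checkiUnits, checkiP, ih]
        · have hS : c = 'S' := by
            simp [checkiP] at hc; tauto
          simp [checkiLoopA, checkiTok, checkiAssign, hS, checkiUnits, checkiP, ih]
    · have hc' : c ∉ checkiUnits := hc
      simp [checkiLoopA, checkiTok, hc, hc', ih]

-- ===== VERDICT (by name: the statement is the Claim_ definition above) =====
theorem checki_spec : Claim_equal_checki := by
  intro x _
  unfold Spec_checki checki checki_alt
  have h := checkiLoop_eq_tok (x.toList.drop 2) [] [] [] []
  simp only at h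
  have h1 := congrArg Prod.fst h
  have h2 := congrArg (fun r => r.2.1) h
  have h3 := congrArg (fun r => r.2.2) h
  simp only at h1 h2 h3
  simp only [h1, h2, h3]
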